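-- pv_equiv track=rewrite | github.com/summerm104/Advent-of-Code-2021 | day5_2.py | countCoordinates
-- ===== SOURCE A (Python) =====
-- def countCoordinates(all_coords):
--     count_dict = {}
--     count_points = 0
--     for coords in all_coords:
--         for coord in coords:
--             if coord not in count_dict:
--                 count_dict[coord] = 1
--             else:
--                 count_dict[coord] += 1
--     for k in count_dict:
--         if count_dict[k] > 1:
--             count_points += 1
--     return count_points
-- ===== SOURCE B (Python) =====
-- def countCoordinates(all_coords):
--     seen = set()
--     counted = set()
--     result = 0
--     for coords in all_coords:
--         for coord in coords:
--             if coord in seen and coord not in counted: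
--                 counted.add(coord)
--                 result += 1
--             else:
--                 seen.add(coord)
--     return result
-- ===== Notes on version B (the rewrite author's own statement) =====
-- stated objective: alternative
-- what changed: Replaced the dict count tally plus a second counting pass over the keys by a single pass that keeps two sets (seen once, already counted as duplicate) and increments the result the moment a coordinate is seen a second time.
import Mathlib
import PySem

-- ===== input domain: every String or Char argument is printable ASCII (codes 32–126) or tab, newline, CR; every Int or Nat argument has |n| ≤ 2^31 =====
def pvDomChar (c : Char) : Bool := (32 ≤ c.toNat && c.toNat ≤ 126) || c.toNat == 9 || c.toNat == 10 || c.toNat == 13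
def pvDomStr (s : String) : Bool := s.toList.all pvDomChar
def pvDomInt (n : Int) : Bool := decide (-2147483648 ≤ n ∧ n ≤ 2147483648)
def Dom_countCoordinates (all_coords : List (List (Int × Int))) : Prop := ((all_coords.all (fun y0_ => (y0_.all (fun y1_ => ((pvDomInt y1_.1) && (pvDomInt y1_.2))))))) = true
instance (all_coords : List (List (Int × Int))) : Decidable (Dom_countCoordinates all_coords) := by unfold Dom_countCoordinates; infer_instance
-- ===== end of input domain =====

-- B replaces the count-dict plus second counting pass by a single pass over the
-- coordinates maintaining two sets (seen, counted-as-duplicate) and a running result.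

-- ===== PORT A =====
def countCoordinates (all_coords : List (List (Int × Int))) : Int :=
  let count_dict : PySem.Dict (Int × Int) Int :=
    all_coords.foldl
      (fun d coords =>
        coords.foldl
          (fun d coord =>
            if d.contains coord = false then d.insert coord 1
            else d.modify coord 0 (· + 1))
          d)
      PySem.Dict.empty
  count_dict.keys.foldl
    (fun count_points k =>
      if count_dict.getD k 0 > 1 then count_points + 1 else count_points)
    0

-- ===== PORT B =====
-- state: (seen, counted, result)
def pvStepB (st : PySem.Set (Int × Int) × PySem.Set (Int × Int) × Int) (coord : Int × Int) :
    PySem.Set (Int × Int) × PySem.Set (Int × Int) × Int :=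
  if st.1.contains coord && !(st.2.1.contains coord) then
    (st.1, PySem.Set.add st.2.1 coord, st.2.2 + 1)
  else
    (PySem.Set.add st.1 coord, st.2.1, st.2.2)

def countCoordinates_alt (all_coords : List (List (Int × Int))) : Int :=
  (all_coords.foldl (fun st coords => coords.foldl pvStepB st)
    (PySem.Set.empty, PySem.Set.empty, 0)).2.2

-- ===== PRECONDITION & SPEC =====
def Spec_countCoordinates (all_coords : List (List (Int × Int))) (out : Int) : Prop := out = countCoordinates_alt all_coords
instance (all_coords : List (List (Int × Int))) (out : Int) : Decidable (Spec_countCoordinates all_coords out) := by unfold Spec_countCoordinates; infer_instance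

-- ===== CLAIM (what is proved, stated in full; the proofs are below) =====
def Claim_equal_countCoordinates : Prop := ∀ (all_coords : List (List (Int × Int))), Dom_countCoordinates all_coords → Spec_countCoordinates all_coords (countCoordinates all_coords)

-- ===== LEMMAS AND PROOFS =====

-- A's per-coordinate dict update is exactly the Counter step.
theorem pvStepA_eq (d : PySem.Dict (Int × Int) Int) (c : Int × Int) :
    (if d.contains c = false then d.insert c 1 else d.modify c 0 (· + 1))
      = d.modify c 0 (· + 1) := by
  by_cases h : d.contains c = false
  · simp only [h, if_true]
    unfold PySem.Dict.modify
    rw [PySem.Dict.getD_of_not_contains _ _ h]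
    norm_num
  · simp [h]

theorem pv_ofList_append_singleton {α : Type} [BEq α] (P : List α) (c : α) :
    PySem.Set.ofList (P ++ [c]) = PySem.Set.add (PySem.Set.ofList P) c := by
  simp [PySem.Set.ofList_eq_foldl, List.foldl_append]

-- counting loop = length of filter
theorem pv_foldl_count_filter (l : List (Int × Int)) (p : Int × Int → Prop)
    [DecidablePred p] (a : Int) :
    l.foldl (fun acc k => if p k then acc + 1 else acc) a
      = a + ((l.filter (fun k => decide (p k))).length : Int) := by
  induction l generalizing a with
  | nil => simp
  | cons x xs ih =>
    by_cases h : p x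
    · simp [List.foldl_cons, ih, h]
      ring
    · simp [List.foldl_cons, ih, h]

-- B's loop invariant over the flat coordinate stream
theorem pvB_inv (F : List (Int × Int)) :
    ∀ (P : List (Int × Int)) (counted : PySem.Set (Int × Int)),
    counted.Nodup →
    (∀ k, k ∈ counted ↔ 2 ≤ P.count k) →
    ∃ counted' : PySem.Set (Int × Int),
      F.foldl pvStepB (PySem.Set.ofList P, counted, (counted.length : Int))
        = (PySem.Set.ofList (P ++ F), counted', (counted'.length : Int))
      ∧ counted'.Nodup ∧ (∀ k, k ∈ counted' ↔ 2 ≤ (P ++ F).count k) := by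
  induction F with
  | nil =>
    intro P counted hnd hmem
    exact ⟨counted, by simp, hnd, by simpa using hmem⟩
  | cons c F ih =>
    intro P counted hnd hmem
    simp only [List.foldl_cons]
    by_cases hc : ((PySem.Set.ofList P).contains c && !counted.contains c) = true
    · -- c seen before, not yet counted: counted grows by c
      have hin : c ∈ P := by
        have h1 := ((Bool.and_eq_true _ _).mp hc).1
        have h2 : c ∈ PySem.Set.ofList P := by
          simpa [PySem.Set.contains, List.contains_eq_mem] using h1
        exact (PySem.Set.mem_ofList P c).1 h2
      have hnc : c ∉ counted := by
        have := ((Bool.and_eq_true _ _).mp hc).2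
        simpa [PySem.Set.contains, List.contains_eq_mem] using this
      have hseen : PySem.Set.ofList (P ++ [c]) = PySem.Set.ofList P := by
        rw [pv_ofList_append_singleton]
        simp [PySem.Set.add, PySem.Set.contains, List.contains_eq_mem,
          (PySem.Set.mem_ofList P c).2 hin]
      have hadd : PySem.Set.add counted c = counted ++ [c] := by
        simp [PySem.Set.add, PySem.Set.contains, List.contains_eq_mem, hnc]
      have hstep : pvStepB (PySem.Set.ofList P, counted, (counted.length : Int)) c
          = (PySem.Set.ofList (P ++ [c]), counted ++ [c], (((counted ++ [c]).length : Nat) : Int)) := by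
        unfold pvStepB
        rw [if_pos hc]
        simp [hseen, hadd]
      have hnd' : (counted ++ [c]).Nodup := by
        rw [List.nodup_append]
        refine ⟨hnd, List.nodup_singleton c, ?_⟩
        intro a ha b hb h
        rw [List.mem_singleton] at hb
        subst hb; subst h
        exact hnc ha
      have hmem' : ∀ k, k ∈ counted ++ [c] ↔ 2 ≤ (P ++ [c]).count k := by
        intro k
        by_cases hk : k = c
        · subst hk
          have hpos : 1 ≤ P.count k := List.one_le_count_iff.2 hin
          have h1 : List.count k [k] = 1 := by simp
          simp only [List.count_append, h1, List.mem_append, List.mem_singleton]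
          constructor
          · intro _; omega
          · intro _; simp
        · have hc0 : List.count k [c] = 0 := List.count_eq_zero.2 (by simp [hk])
          simp only [List.count_append, hc0, Nat.add_zero, List.mem_append,
            List.mem_singleton, hk, or_false]
          exact hmem k
      rw [hstep]
      simpa [List.append_assoc] using ih (P ++ [c]) (counted ++ [c]) hnd' hmem'
    · -- c unseen, or already counted: counted unchanged
      have hcase : c ∉ P ∨ c ∈ counted := by
        by_cases h1 : c ∈ P
        · right
          by_contra h2
          exact hc (by
            simp [PySem.Set.contains, List.contains_eq_mem,
              (PySem.Set.mem_ofList P c).2 h1, h2])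
        · exact Or.inl h1
      have hseen : PySem.Set.add (PySem.Set.ofList P) c = PySem.Set.ofList (P ++ [c]) :=
        (pv_ofList_append_singleton P c).symm
      have hstep : pvStepB (PySem.Set.ofList P, counted, (counted.length : Int)) c
          = (PySem.Set.ofList (P ++ [c]), counted, ((counted.length : Nat) : Int)) := by
        unfold pvStepB
        rw [if_neg hc]
        simp [hseen]
      have hmem' : ∀ k, k ∈ counted ↔ 2 ≤ (P ++ [c]).count k := by
        intro k
        by_cases hk : k = c
        · subst hk
          have h1 : List.count k [k] = 1 := by simp
          rcases hcase with h | h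
          · have h0 : P.count k = 0 := List.count_eq_zero.2 h
            rw [hmem k]
            simp only [List.count_append, h0, h1]
            omega
          · have h2 : 2 ≤ P.count k := (hmem k).1 h
            simp only [List.count_append, h1]
            constructor
            · intro _; omega
            · intro _; exact h
        · have hc0 : List.count k [c] = 0 := List.count_eq_zero.2 (by simp [hk])
          rw [hmem k]
          simp [List.count_append, hc0]
      rw [hstep]
      simpa [List.append_assoc] using ih (P ++ [c]) counted hnd hmem'

-- ===== VERDICT (by name: the statement is the Claim_ definition above) =====
theorem countCoordinates_spec : Claim_equal_countCoordinates := by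
  intro all_coords _
  unfold Spec_countCoordinates countCoordinates countCoordinates_alt
  set F := all_coords.flatten with hF
  -- A side: the nested fold is the Counter of the flat stream
  have hdict : all_coords.foldl
      (fun d coords => coords.foldl
        (fun d coord => if d.contains coord = false then d.insert coord 1
          else d.modify coord 0 (· + 1)) d)
      PySem.Dict.empty = PySem.Dict.counter F := by
    rw [PySem.Dict.counter_eq_foldl, hF, ← List.foldl_flatten]
    congr 1
    funext d c
    exact pvStepA_eq d c
  have hA : (PySem.Dict.counter F).keys.foldl
      (fun count_points k =>
        if (PySem.Dict.counter F).getD k 0 > 1 then count_points + 1 else count_points)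
      (0 : Int)
      = (((PySem.Set.ofList F).filter (fun k => decide (1 < F.count k))).length : Int) := by
    rw [PySem.Dict.keys_counter,
      pv_foldl_count_filter (PySem.Set.ofList F) (fun k => (PySem.Dict.counter F).getD k 0 > 1) 0]
    have hfil : (PySem.Set.ofList F).filter (fun k => decide ((PySem.Dict.counter F).getD k 0 > 1))
        = (PySem.Set.ofList F).filter (fun k => decide (1 < F.count k)) := by
      apply List.filter_congr
      intro k _
      rw [decide_eq_decide, PySem.Dict.getD_counter]
      exact_mod_cast Iff.rfl
    rw [hfil]
    ring
  -- B side: the invariant, started from the empty state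
  obtain ⟨counted', hfold, hnd', hmem'⟩ :=
    pvB_inv F [] PySem.Set.empty (by simp [PySem.Set.empty]) (by simp [PySem.Set.empty])
  simp only [List.nil_append] at hfold hmem'
  have hBfold : all_coords.foldl (fun st coords => coords.foldl pvStepB st)
      (PySem.Set.empty, PySem.Set.empty, 0)
      = (PySem.Set.ofList F, counted', (counted'.length : Int)) := by
    rw [← List.foldl_flatten, ← hF]
    simpa [PySem.Set.empty, PySem.Set.ofList] using hfold
  rw [hdict, hA, hBfold]
  -- the two Nodup lists have the same members, hence the same length
  have hperm : ((PySem.Set.ofList F).filter (fun k => decide (1 < F.count k))).Perm counted' := by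
    rw [List.perm_ext_iff_of_nodup ((PySem.Set.nodup_ofList F).filter _) hnd']
    intro k
    rw [List.mem_filter, hmem' k, PySem.Set.mem_ofList, decide_eq_true_eq]
    constructor
    · rintro ⟨_, h⟩
      omega
    · intro h
      refine ⟨List.count_pos_iff.1 (by omega), by omega⟩
  simp [hperm.length_eq]
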